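-- pv_equiv track=rewrite | github.com/anderssonlab/DeepCompARE | Scripts_python/seq_ops.py | ablate_motifs
-- ===== SOURCE A (Python) =====
-- def ablate_motifs(seq, motif_starts, motif_ends):
--     """
--     Scramble the sequence between multiple motif start and end positions.
--     Args:
--         seq: A string of sequence.
--         motif_starts: A list of integers for motif starts.
--         motif_ends: A list of integers for motif ends.
--     Returns:
--         A string of scrambled sequence.
--     """
--     if isinstance(motif_starts, int):
--         motif_starts = [motif_starts]
--     if isinstance(motif_ends, int):
--         motif_ends = [motif_ends]
--     if len(motif_starts) != len(motif_ends):
--         raise ValueError("motif_starts and motif_ends must have the same length")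
--     # Sort the motifs by start position
--     motifs = sorted(zip(motif_starts, motif_ends), key=lambda x: x[0])
--     # Initialize variables
--     seq_ablated = ''
--     previous_end = 0
--     # Iterate and ablate each motif
--     for start, end in motifs:
--         if start < previous_end:
--             raise ValueError("Overlapping motifs detected")
--         end = end + 1
--         motif = seq[start:end]
--         motif_scrambled = "N" * len(motif)
--         # Append non-motif and scrambled motif parts
--         seq_ablated += seq[previous_end:start] + motif_scrambled
--         previous_end = end
--     # Append the remaining part of the sequence if any
--     seq_ablated += seq[previous_end:]
--     return seq_ablated
-- ===== SOURCE B (Python) =====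
-- def ablate_motifs(seq, motif_starts, motif_ends):
--     """
--     Scramble (ablate) the given motif regions of seq with 'N'.
--     Materializes the sequence as a mutable character buffer and overwrites
--     each motif region in place; since every patch writes the same filler,
--     the order of motifs is irrelevant, so no sorting and no running
--     previous-end pointer are needed.
--     """
--     if isinstance(motif_starts, int):
--         motif_starts = [motif_starts]
--     if isinstance(motif_ends, int):
--         motif_ends = [motif_ends]
--     if len(motif_starts) != len(motif_ends):
--         raise ValueError("motif_starts and motif_ends must have the same length")
--     chars = list(seq)
--     for start, end in zip(motif_starts, motif_ends):
--         chars[start:end + 1] = 'N' * len(chars[start:end + 1])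
--     return ''.join(chars)
-- ===== Notes on version B (the rewrite author's own statement) =====
-- stated objective: simpler
-- what changed: B materializes the sequence as a mutable character buffer and overwrites each motif region in place with 'N' (order-independent since every patch writes the same filler), instead of A's sort-then-rebuild that concatenates gap slices and scrambled motifs while threading a running previous_end pointer; B needs no sorting and no overlap bookkeeping.
-- intended difference: On motifs whose Python-normalized end+1 falls before their normalized start or before the next motif's start (e.g. end < start-1, or a negative end wrapping around), A's slice pieces overlap and it returns a longer string duplicating sequence content, while B returns seq with exactly the motif positions set to 'N' — the intended ablation. — e.g. on ablate_motifs("ABCD", [3], [0]): A returns "ABCBCD", B returns "ABCD"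
import Mathlib
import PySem

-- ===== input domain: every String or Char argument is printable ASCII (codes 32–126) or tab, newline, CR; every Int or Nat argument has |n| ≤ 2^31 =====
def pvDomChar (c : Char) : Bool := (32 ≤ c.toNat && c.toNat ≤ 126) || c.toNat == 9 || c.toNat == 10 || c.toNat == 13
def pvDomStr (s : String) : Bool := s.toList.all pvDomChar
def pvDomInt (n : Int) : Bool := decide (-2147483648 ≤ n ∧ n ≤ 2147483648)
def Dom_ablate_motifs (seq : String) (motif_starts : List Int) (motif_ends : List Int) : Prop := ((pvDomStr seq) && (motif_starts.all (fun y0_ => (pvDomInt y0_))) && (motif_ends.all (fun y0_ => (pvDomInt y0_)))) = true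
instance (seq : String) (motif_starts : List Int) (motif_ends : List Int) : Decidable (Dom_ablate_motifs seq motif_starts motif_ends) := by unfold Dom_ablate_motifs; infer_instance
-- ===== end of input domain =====

-- B overwrites each motif region in a mutable character buffer (order-independent constant
-- filler, so no sorting and no running previous_end), instead of A's sorted piecewise rebuild;
-- on motifs with inverted/negative boundaries (D_) B returns the intended ablation where A
-- duplicates sequence content.

-- ===== PORT A =====
-- sorted(zip(motif_starts, motif_ends), key=lambda x: x[0])
def sortMotifs (motif_starts motif_ends : List Int) : List (Int × Int) :=
  PySem.List.sorted (motif_starts.zip motif_ends) (fun p => p.1) false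

-- one iteration of A's loop; none = the "Overlapping motifs detected" ValueError
def ablateStepA (cs : List Char) (st : Option (List Char × Int)) (p : Int × Int) :
    Option (List Char × Int) :=
  match st with
  | none => none
  | some (acc, prev) =>
    if p.1 < prev then none
    else
      some (acc ++ PySem.List.slice cs (some prev) (some p.1)
                ++ List.replicate (PySem.List.slice cs (some p.1) (some (p.2 + 1))).length 'N',
            p.2 + 1)

def ablate_motifs (seq : String) (motif_starts : List Int) (motif_ends : List Int) : String :=
  if motif_starts.length = motif_ends.length then
    match (sortMotifs motif_starts motif_ends).foldl (ablateStepA seq.toList)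
        (some (([] : List Char), (0 : Int))) with
    | some (acc, prev) => String.ofList (acc ++ PySem.List.slice seq.toList (some prev) none)
    | none => ""  -- unreachable under Pre_: A raised "Overlapping motifs detected"
  else ""  -- unreachable under Pre_: A raised the length-mismatch ValueError

-- ===== PORT B =====
-- chars[start:end+1] = 'N' * len(chars[start:end+1]) — exact port of CPython list slice
-- assignment: indices normalized with the same clamping slice uses (clampIdx), the stop
-- index raised to the start if smaller, and the region replaced by the equally long filler.
def patchStep (cs : List Char) (p : Int × Int) : List Char :=
  let i := PySem.List.clampIdx cs.length p.1
  let j := max (PySem.List.clampIdx cs.length (p.2 + 1)) i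
  cs.take i ++ List.replicate (j - i) 'N' ++ cs.drop j

def ablate_motifs_alt (seq : String) (motif_starts : List Int) (motif_ends : List Int) : String :=
  if motif_starts.length = motif_ends.length then
    String.ofList ((motif_starts.zip motif_ends).foldl patchStep seq.toList)
  else ""  -- unreachable under Pre_: B raised the length-mismatch ValueError

-- ===== PRECONDITION & SPEC =====
-- A's exact no-raise condition: equal list lengths, and in start-sorted order each motif
-- start is ≥ the previous end+1 (first start ≥ 0) — else A raises ValueError.
def chainOkB : Int → List (Int × Int) → Bool
  | _, [] => true
  | prev, p :: t => decide (prev ≤ p.1) && chainOkB (p.2 + 1) t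

def Pre_ablate_motifs (seq : String) (motif_starts : List Int) (motif_ends : List Int) : Prop :=
  motif_starts.length = motif_ends.length ∧
  chainOkB 0 (sortMotifs motif_starts motif_ends) = true

instance (seq : String) (motif_starts : List Int) (motif_ends : List Int) : Decidable (Pre_ablate_motifs seq motif_starts motif_ends) := by unfold Pre_ablate_motifs; infer_instance

def pvWitness_ablate_motifs : String × List Int × List Int := ("GATTACA", [1, 4], [2, 5])

-- Python-normalized motif boundaries (clampIdx = Python's slice-index normalization) must be
-- nondecreasing: norm(prev) ≤ norm(start) ≤ norm(end+1) along the start-sorted motifs.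
def normChainOk (n : Nat) : Int → List (Int × Int) → Bool
  | _, [] => true
  | prev, p :: t =>
    decide (PySem.List.clampIdx n prev ≤ PySem.List.clampIdx n p.1) &&
    decide (PySem.List.clampIdx n p.1 ≤ PySem.List.clampIdx n (p.2 + 1)) &&
    normChainOk n (p.2 + 1) t

-- On inputs where some motif's normalized end+1 falls before its normalized start (or before
-- the next motif's start) — e.g. end < start-1, or a negative end wrapping around — A's
-- overlapping slice pieces duplicate sequence content and return a string longer than seq,
-- while B returns seq with exactly the motif positions replaced by 'N', the intended ablation.
def D_ablate_motifs (seq : String) (motif_starts : List Int) (motif_ends : List Int) : Prop :=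
  normChainOk seq.length 0 (sortMotifs motif_starts motif_ends) = false

instance (seq : String) (motif_starts : List Int) (motif_ends : List Int) : Decidable (D_ablate_motifs seq motif_starts motif_ends) := by unfold D_ablate_motifs; infer_instance

def Spec_ablate_motifs (seq : String) (motif_starts : List Int) (motif_ends : List Int) (out : String) : Prop := ¬ D_ablate_motifs seq motif_starts motif_ends → out = ablate_motifs_alt seq motif_starts motif_ends
instance (seq : String) (motif_starts : List Int) (motif_ends : List Int) (out : String) : Decidable (Spec_ablate_motifs seq motif_starts motif_ends out) := by unfold Spec_ablate_motifs; infer_instance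

def pvDiffWitness_ablate_motifs : String × List Int × List Int := ("ABCD", [3], [0])
def pvDiffWitnessOut_ablate_motifs : String × String := ("ABCBCD", "ABCD")

-- ===== CLAIM (what is proved, stated in full; the proofs are below) =====
def Claim_unchanged_ablate_motifs : Prop := ∀ (seq : String) (motif_starts : List Int) (motif_ends : List Int), Dom_ablate_motifs seq motif_starts motif_ends → Pre_ablate_motifs seq motif_starts motif_ends → Spec_ablate_motifs seq motif_starts motif_ends (ablate_motifs seq motif_starts motif_ends)
def Claim_changed_ablate_motifs : Prop := Dom_ablate_motifs (pvDiffWitness_ablate_motifs.1) (pvDiffWitness_ablate_motifs.2.1) (pvDiffWitness_ablate_motifs.2.2) ∧ Pre_ablate_motifs (pvDiffWitness_ablate_motifs.1) (pvDiffWitness_ablate_motifs.2.1) (pvDiffWitness_ablate_motifs.2.2) ∧ D_ablate_motifs (pvDiffWitness_ablate_motifs.1) (pvDiffWitness_ablate_motifs.2.1) (pvDiffWitness_ablate_motifs.2.2) ∧ ablate_motifs (pvDiffWitness_ablate_motifs.1) (pvDiffWitness_ablate_motifs.2.1) (pvDiffWitness_ablate_motifs.2.2) = pvDiffWitnessOut_ablate_motifs.1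 ∧ ablate_motifs_alt (pvDiffWitness_ablate_motifs.1) (pvDiffWitness_ablate_motifs.2.1) (pvDiffWitness_ablate_motifs.2.2) = pvDiffWitnessOut_ablate_motifs.2 ∧ pvDiffWitnessOut_ablate_motifs.1 ≠ pvDiffWitnessOut_ablate_motifs.2
def Claim_exact_ablate_motifs : Prop := ∀ (seq : String) (motif_starts : List Int) (motif_ends : List Int), Dom_ablate_motifs seq motif_starts motif_ends → Pre_ablate_motifs seq motif_starts motif_ends → D_ablate_motifs seq motif_starts motif_ends → ablate_motifs seq motif_starts motif_ends ≠ ablate_motifs_alt seq motif_starts motif_ends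

-- ===== LEMMAS AND PROOFS =====

-- length facts
lemma patchStep_length (cs : List Char) (p : Int × Int) :
    (patchStep cs p).length = cs.length := by
  have hi := PySem.List.clampIdx_le cs.length p.1
  have hj := PySem.List.clampIdx_le cs.length (p.2 + 1)
  simp [patchStep]
  omega

lemma foldl_patch_length (L : List (Int × Int)) : ∀ cs : List Char,
    (L.foldl patchStep cs).length = cs.length := by
  induction L with
  | nil => intro cs; rfl
  | cons p t ih => intro cs; rw [List.foldl_cons, ih, patchStep_length]

-- pointwise description of one patch
lemma patchStep_getElem? (cs : List Char) (p : Int × Int) (k : Nat) :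
    (patchStep cs p)[k]? =
      if PySem.List.clampIdx cs.length p.1 ≤ k ∧
         k < max (PySem.List.clampIdx cs.length (p.2 + 1)) (PySem.List.clampIdx cs.length p.1)
      then some 'N' else cs[k]? := by
  have hi := PySem.List.clampIdx_le cs.length p.1
  have hj := PySem.List.clampIdx_le cs.length (p.2 + 1)
  set i := PySem.List.clampIdx cs.length p.1 with hidef
  set j := max (PySem.List.clampIdx cs.length (p.2 + 1)) i with hjdef
  have hij : i ≤ j := le_max_right _ _
  have hjn : j ≤ cs.length := by omega
  have hkey : patchStep cs p = cs.take i ++ (List.replicate (j - i) 'N' ++ cs.drop j) := by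
    simp [patchStep, ← hidef, ← hjdef, List.append_assoc]
  clear_value i j
  rw [hkey, List.getElem?_append, List.length_take, min_eq_left hi]
  rcases lt_or_ge k i with hk | hk
  · rw [if_pos hk, List.getElem?_take, if_pos hk, if_neg (by omega)]
  · rw [if_neg (by omega), List.getElem?_append, List.length_replicate,
        List.getElem?_replicate]
    rcases lt_or_ge k j with hk2 | hk2
    · rw [if_pos (by omega), if_pos (by omega), if_pos ⟨hk, hk2⟩]
    · rw [if_neg (by omega), if_neg (by omega), List.getElem?_drop]
      congr 1
      omega

lemma patchStep_comm (cs : List Char) (p q : Int × Int) :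
    patchStep (patchStep cs p) q = patchStep (patchStep cs q) p := by
  apply List.ext_getElem?
  intro k
  rw [patchStep_getElem?, patchStep_getElem?, patchStep_getElem?, patchStep_getElem?,
      patchStep_length, patchStep_length]
  split_ifs <;> rfl

-- the rest of A's output from a given previous_end
def restA (cs : List Char) : List (Int × Int) → Int → List Char
  | [], prev => PySem.List.slice cs (some prev) none
  | (s, e) :: t, prev =>
    PySem.List.slice cs (some prev) (some s) ++
    List.replicate (PySem.List.slice cs (some s) (some (e + 1))).length 'N' ++
    restA cs t (e + 1)

-- under A's no-raise chain, the fold succeeds and produces restA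
lemma runA (cs : List Char) : ∀ (L : List (Int × Int)) (prev : Int) (acc : List Char),
    chainOkB prev L = true →
    ∃ a p, L.foldl (ablateStepA cs) (some (acc, prev)) = some (a, p) ∧
      a ++ PySem.List.slice cs (some p) none = acc ++ restA cs L prev := by
  intro L
  induction L with
  | nil => intro prev acc _; exact ⟨acc, prev, rfl, rfl⟩
  | cons pe t ih =>
    intro prev acc h
    obtain ⟨s, e⟩ := pe
    simp only [chainOkB, Bool.and_eq_true, decide_eq_true_eq] at h
    obtain ⟨hs, hc⟩ := h
    obtain ⟨a, p, hf, heq⟩ := ih (e + 1)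
      (acc ++ PySem.List.slice cs (some prev) (some s)
           ++ List.replicate (PySem.List.slice cs (some s) (some (e + 1))).length 'N') hc
    refine ⟨a, p, ?_, ?_⟩
    · rw [List.foldl_cons]
      simpa [ablateStepA, not_lt.mpr hs] using hf
    · rw [heq, restA]
      simp [List.append_assoc]

-- patches whose normalized chain starts at or beyond q leave the prefix below q unchanged
lemma patch_take_stable : ∀ (t : List (Int × Int)) (X : List Char) (prev : Int) (q : Nat),
    q ≤ PySem.List.clampIdx X.length prev → normChainOk X.length prev t = true →
    (t.foldl patchStep X).take q = X.take q := by
  intro t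
  induction t with
  | nil => intro X prev q _ _; rfl
  | cons pe t ih =>
    intro X prev q hq h
    obtain ⟨s, e⟩ := pe
    simp only [normChainOk, Bool.and_eq_true, decide_eq_true_eq] at h
    obtain ⟨⟨h1, h2⟩, hc⟩ := h
    have hi := PySem.List.clampIdx_le X.length s
    have hlen : (patchStep X (s, e)).length = X.length := patchStep_length X (s, e)
    rw [List.foldl_cons, ih (patchStep X (s, e)) (e + 1) q (by rw [hlen]; omega)
          (by rw [hlen]; exact hc)]
    -- take q of the patched list with q ≤ i = clampIdx X.length s
    have hqi : q ≤ PySem.List.clampIdx X.length s := by omega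
    simp only [patchStep]
    rw [List.append_assoc, List.take_append_of_le_length (by simp; omega), List.take_take,
        min_eq_left hqi]

-- MAIN: A's piecewise rebuild from prev equals the suffix (from norm prev) of B's patched buffer
lemma restA_eq_patch (cs : List Char) : ∀ (L : List (Int × Int)) (cs' : List Char) (prev : Int),
    cs.length = cs'.length →
    cs.drop (PySem.List.clampIdx cs.length prev) = cs'.drop (PySem.List.clampIdx cs.length prev) →
    normChainOk cs.length prev L = true →
    restA cs L prev = (L.foldl patchStep cs').drop (PySem.List.clampIdx cs.length prev) := by
  intro L
  induction L with
  | nil =>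
    intro cs' prev _ hdrop _
    rw [restA, PySem.List.slice_some_none, hdrop, List.foldl_nil]
  | cons pe t ih =>
    intro cs' prev hlen hdrop h
    obtain ⟨s, e⟩ := pe
    simp only [normChainOk, Bool.and_eq_true, decide_eq_true_eq] at h
    obtain ⟨⟨h1, h2⟩, hc⟩ := h
    set n := cs.length with hn
    set p := PySem.List.clampIdx n prev with hp
    set i := PySem.List.clampIdx n s with hidef
    set j := PySem.List.clampIdx n (e + 1) with hjdef
    have hin : i ≤ n := PySem.List.clampIdx_le _ _
    have hjn : j ≤ n := PySem.List.clampIdx_le _ _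
    have hpn : p ≤ n := PySem.List.clampIdx_le _ _
    -- the patched buffer
    have hX : patchStep cs' (s, e) = cs'.take i ++ List.replicate (j - i) 'N' ++ cs'.drop j := by
      simp only [patchStep, ← hlen, ← hidef, ← hjdef, max_eq_left h2]
    set X := patchStep cs' (s, e) with hXdef
    have hXlen : X.length = n := by rw [hXdef, patchStep_length, hlen]
    have htakei : (cs'.take i).length = i := by rw [List.length_take]; omega
    have hXdropj : X.drop j = cs'.drop j := by
      rw [hX]
      exact List.drop_left' (by simp; omega)
    have hXtakej : X.take j = cs'.take i ++ List.replicate (j - i) 'N' := by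
      rw [hX]
      exact List.take_left' (by simp; omega)
    have hdropj : cs.drop j = cs'.drop j := by
      have h' : ∀ l : List Char, l.drop j = (l.drop p).drop (j - p) := by
        intro l; rw [List.drop_drop]; congr 1; omega
      rw [h' cs, h' cs', hdrop]
    -- IH for the tail
    have hih := ih X (e + 1) (by rw [hXlen]) (by rw [← hjdef, hdropj, hXdropj]) hc
    -- prefix of the final buffer up to j is X's
    set Y := t.foldl patchStep X with hYdef
    have hYtake : Y.take j = X.take j :=
      patch_take_stable t X (e + 1) j (by rw [hXlen, ← hjdef]) (by rw [hXlen]; exact hc)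
    have hYlen : Y.length = n := by rw [hYdef, foldl_patch_length, hXlen]
    -- split Y.drop p at j
    have hsplit : Y.drop p = (Y.take j).drop p ++ Y.drop j := by
      conv_lhs => rw [← List.take_append_drop j Y]
      rw [List.drop_append_of_le_length (by rw [List.length_take]; omega)]
    rw [List.foldl_cons, ← hXdef, ← hYdef, hsplit, hYtake, hXtakej,
        List.drop_append_of_le_length (by rw [htakei]; omega),
        List.drop_take]
    rw [restA, hih, ← hjdef]
    have hslice1 : PySem.List.slice cs (some prev) (some s) = (cs.drop p).take (i - p) := rfl
    have hslice2 : (PySem.List.slice cs (some s) (some (e + 1))).length = j - i := by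
      rw [PySem.List.length_slice, ← hidef, ← hjdef]
    rw [hslice1, hslice2, hdrop]

-- length of A's rest: at least the remaining suffix, strictly more when the chain breaks
lemma restA_len (cs : List Char) : ∀ (L : List (Int × Int)) (prev : Int),
    cs.length - PySem.List.clampIdx cs.length prev ≤ (restA cs L prev).length ∧
    (normChainOk cs.length prev L = false →
      cs.length - PySem.List.clampIdx cs.length prev < (restA cs L prev).length) := by
  intro L
  induction L with
  | nil =>
    intro prev
    constructor
    · rw [restA, PySem.List.slice_some_none, List.length_drop]
    · intro h; simp [normChainOk] at h
  | cons pe t ih =>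
    intro prev
    obtain ⟨s, e⟩ := pe
    have hpn := PySem.List.clampIdx_le cs.length prev
    have hin := PySem.List.clampIdx_le cs.length s
    have hjn := PySem.List.clampIdx_le cs.length (e + 1)
    have hge := (ih (e + 1)).1
    have hgt := (ih (e + 1)).2
    have hlen : (restA cs ((s, e) :: t) prev).length =
        (PySem.List.clampIdx cs.length s - PySem.List.clampIdx cs.length prev) +
        (PySem.List.clampIdx cs.length (e + 1) - PySem.List.clampIdx cs.length s) +
        (restA cs t (e + 1)).length := by
      rw [restA]
      simp only [List.length_append, List.length_replicate, PySem.List.length_slice]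
      try omega
    constructor
    · omega
    · intro h
      by_cases h1 : PySem.List.clampIdx cs.length prev ≤ PySem.List.clampIdx cs.length s
      · by_cases h2 : PySem.List.clampIdx cs.length s ≤ PySem.List.clampIdx cs.length (e + 1)
        · cases hnc : normChainOk cs.length (e + 1) t with
          | true => rw [normChainOk] at h; simp [h1, h2, hnc] at h
          | false => have := hgt hnc; omega
        · omega
      · omega

-- A under Pre_ computes restA from 0
lemma ablate_eq_restA (seq : String) (ms me : List Int)
    (hlen : ms.length = me.length) (hch : chainOkB 0 (sortMotifs ms me) = true) :
    ablate_motifs seq ms me = String.ofList (restA seq.toList (sortMotifs ms me) 0) := by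
  obtain ⟨a, p, hf, heq⟩ := runA seq.toList (sortMotifs ms me) 0 [] hch
  rw [ablate_motifs, if_pos hlen, hf]
  simp only [List.nil_append] at heq
  show String.ofList (a ++ PySem.List.slice seq.toList (some p) none) =
    String.ofList (restA seq.toList (sortMotifs ms me) 0)
  exact congrArg String.ofList heq

-- B under equal lengths is the patched buffer, in sorted order (patches commute)
lemma alt_eq_patch (seq : String) (ms me : List Int) (hlen : ms.length = me.length) :
    ablate_motifs_alt seq ms me =
      String.ofList ((sortMotifs ms me).foldl patchStep seq.toList) := by
  rw [ablate_motifs_alt, if_pos hlen]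
  haveI : RightCommutative patchStep := ⟨fun cs p q => patchStep_comm cs p q⟩
  exact congrArg String.ofList
    (((PySem.List.sorted_perm (ms.zip me) (fun p => p.1) false).foldl_eq seq.toList).symm)

lemma clampIdx_zero (n : Nat) : PySem.List.clampIdx n 0 = 0 := by
  simp [PySem.List.clampIdx]

-- ===== VERDICT =====
theorem ablate_motifs_spec : Claim_unchanged_ablate_motifs := by
  intro seq ms me _ hpre hnd
  obtain ⟨hlen, hch⟩ := hpre
  have hnc : normChainOk seq.toList.length 0 (sortMotifs ms me) = true := by
    rcases Bool.eq_false_or_eq_true (normChainOk seq.toList.length 0 (sortMotifs ms me)) with ht | hf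
    · exact ht
    · exact absurd (by simpa [D_ablate_motifs] using hf) hnd
  rw [ablate_eq_restA seq ms me hlen hch, alt_eq_patch seq ms me hlen,
      restA_eq_patch seq.toList (sortMotifs ms me) seq.toList 0 rfl rfl hnc,
      clampIdx_zero, List.drop_zero]

theorem ablate_motifs_changed : Claim_changed_ablate_motifs := by
  unfold Claim_changed_ablate_motifs; decide

theorem ablate_motifs_tight : Claim_exact_ablate_motifs := by
  intro seq ms me _ hpre hd
  obtain ⟨hlen, hch⟩ := hpre
  have hnc : normChainOk seq.toList.length 0 (sortMotifs ms me) = false := by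
    simpa [D_ablate_motifs] using hd
  have hgt := (restA_len seq.toList (sortMotifs ms me) 0).2 hnc
  rw [clampIdx_zero, Nat.sub_zero] at hgt
  intro h
  rw [ablate_eq_restA seq ms me hlen hch, alt_eq_patch seq ms me hlen] at h
  have := congrArg (fun s => s.toList.length) h
  simp only [String.toList_ofList, foldl_patch_length] at this
  omega
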